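-- pv_equiv track=rewrite | github.com/bjpop/acm_icpc | world_finals/2001/problem_h.py | monotone_increasing
-- ===== SOURCE A (Python) =====
-- def monotone_increasing(n, bits):
--     prev = 0
--     for pos in range(n):
--         bit = bits & (1 << pos)
--         if bit < prev:
--             return False
--         prev = bit
--     return True
-- ===== SOURCE B (Python) =====
-- def monotone_increasing(n, bits):
--     if n <= 0:
--         return True
--     c = (1 << n) - (bits & ((1 << n) - 1))
--     return c & (c - 1) == 0
-- ===== Notes on version B (the rewrite author's own statement) =====
-- stated objective: simpler
-- what changed: Replaces A's per-bit scan with state over range(n) by a closed-form bit test: mask the low n bits once and check that 2^n - masked is a power of two (c & (c-1) == 0), since the monotone patterns are exactly 0 and 2^n - 2^j.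
import Mathlib
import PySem

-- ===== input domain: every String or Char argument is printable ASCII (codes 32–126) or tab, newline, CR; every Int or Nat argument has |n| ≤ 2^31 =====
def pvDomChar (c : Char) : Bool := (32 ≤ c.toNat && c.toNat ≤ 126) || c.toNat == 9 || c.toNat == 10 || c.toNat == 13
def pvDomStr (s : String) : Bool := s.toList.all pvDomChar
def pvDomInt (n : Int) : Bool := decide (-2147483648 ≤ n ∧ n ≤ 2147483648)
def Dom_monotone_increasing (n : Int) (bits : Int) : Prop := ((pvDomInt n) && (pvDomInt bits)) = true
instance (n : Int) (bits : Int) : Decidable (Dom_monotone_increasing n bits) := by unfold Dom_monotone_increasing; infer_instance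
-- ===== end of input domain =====

-- B replaces A's per-bit scan with a closed-form power-of-two test on the masked value.

-- ===== PORT A =====
-- loop 'for pos in range(n)' with state prev, counting pos up from 0 for n.toNat
-- iterations (range is lazy, so the loop is the count, not a materialized list);
-- pos drawn from range(n) is ≥ 0, so pos.toNat is exact
def pvMonoLoop (bits : Int) : Nat → Int → Int → Bool
  | 0, _, _ => true
  | d + 1, pos, prev =>
    let bit := PySem.Int.band bits ((1 : Int) <<< pos.toNat)
    if bit < prev then false else pvMonoLoop bits d (pos + 1) bit

def monotone_increasing (n : Int) (bits : Int) : Bool :=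
  pvMonoLoop bits n.toNat 0 0

-- ===== PORT B =====
-- shift counts are n.toNat, with n ≥ 1 on that branch, exactly Python's 1 << n
def monotone_increasing_alt (n : Int) (bits : Int) : Bool :=
  if n ≤ 0 then true
  else
    let c : Int := ((1 : Int) <<< n.toNat) - PySem.Int.band bits (((1 : Int) <<< n.toNat) - 1)
    PySem.Int.band c (c - 1) == 0

-- ===== PRECONDITION & SPEC =====
def Spec_monotone_increasing (n : Int) (bits : Int) (out : Bool) : Prop := out = monotone_increasing_alt n bits
instance (n : Int) (bits : Int) (out : Bool) : Decidable (Spec_monotone_increasing n bits out) := by unfold Spec_monotone_increasing; infer_instance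

-- ===== CLAIM (what is proved, stated in full; the proofs are below) =====
def Claim_equal_monotone_increasing : Prop := ∀ (n : Int) (bits : Int), Dom_monotone_increasing n bits → Spec_monotone_increasing n bits (monotone_increasing n bits)

-- ===== LEMMAS AND PROOFS =====

theorem pv_band_pow (a : Int) (p : Nat) :
    PySem.Int.band a ((2 : Int) ^ p) = if a.testBit p then (2 : Int) ^ p else 0 := by
  cases a with
  | ofNat m =>
    have h0 : (Int.ofNat m) = (m : Int) := rfl
    have h2 : ((2 : Int) ^ p) = ((2 ^ p : Nat) : Int) := by push_cast; ring
    rw [h0, h2, PySem.Int.band_natCast, Nat.and_two_pow]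
    simp [Int.testBit]
    cases m.testBit p <;> simp
  | negSucc m =>
    have h2 : ((2 : Int) ^ p) = ((2 ^ p : Nat) : Int) := by push_cast; ring
    rw [h2]
    simp only [PySem.Int.band]
    have hneg : ¬ (0 ≤ Int.negSucc m) := by omega
    have hpos : (0:Int) ≤ ((2 ^ p : Nat) : Int) := by positivity
    rw [if_neg hneg, if_pos hpos]
    have h3 : (-(Int.negSucc m) - 1).toNat = m := by
      simp [Int.negSucc_eq]
    rw [h3]
    have h4 : ((2 ^ p : Nat) : Int).toNat = 2 ^ p := by exact Int.toNat_natCast _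
    rw [h4, Nat.and_comm, Nat.and_two_pow]
    simp [Int.testBit]
    cases m.testBit p <;> simp

theorem pv_compl_testBit : ∀ (k r i : Nat), r < 2 ^ k →
    ((2 ^ k - 1) - r).testBit i = (decide (i < k) && !r.testBit i) := by
  intro k
  induction k with
  | zero =>
    intro r i h
    interval_cases r
    simp
  | succ k ih =>
    intro r i h
    have hr2 : r / 2 < 2 ^ k := by omega
    have key : (2 ^ (k+1) - 1) - r = 2 * ((2 ^ k - 1) - r / 2) + (1 - r % 2) := by
      have h2 : r % 2 < 2 := Nat.mod_lt _ (by omega)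
      have := Nat.div_add_mod r 2
      have hle : r / 2 ≤ 2 ^ k - 1 := by omega
      have : 2 ^ (k+1) = 2 * 2 ^ k := by ring
      omega
    rw [key]
    cases i with
    | zero =>
      simp only [Nat.testBit_zero]
      have h2 : r % 2 < 2 := Nat.mod_lt _ (by omega)
      have h1 : r % 2 = 0 ∨ r % 2 = 1 := by omega
      rcases h1 with h1 | h1 <;> simp [h1, Nat.add_mul_mod_self_left]
    | succ i =>
      rw [Nat.testBit_succ, Nat.testBit_succ]
      have hdiv : (2 * ((2 ^ k - 1) - r / 2) + (1 - r % 2)) / 2 = (2 ^ k - 1) - r / 2 := by omega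
      rw [hdiv, ih (r/2) i hr2]
      simp [Nat.succ_lt_succ_iff]

def pvMask (a : Int) (k : Nat) : Nat :=
  match a with
  | .ofNat m => m % 2 ^ k
  | .negSucc m => (2 ^ k - 1) - m % 2 ^ k

theorem pvMask_lt (a : Int) (k : Nat) : pvMask a k < 2 ^ k := by
  have h : 0 < 2 ^ k := Nat.two_pow_pos k
  cases a with
  | ofNat m => exact Nat.mod_lt _ h
  | negSucc m => simp only [pvMask]; omega

theorem pvMask_testBit (a : Int) (k i : Nat) (h : i < k) :
    (pvMask a k).testBit i = a.testBit i := by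
  cases a with
  | ofNat m =>
    simp only [pvMask, Nat.testBit_mod_two_pow, Int.testBit]
    simp [h]
  | negSucc m =>
    have hm : m % 2 ^ k < 2 ^ k := Nat.mod_lt _ (Nat.two_pow_pos k)
    simp only [pvMask, Int.testBit]
    rw [pv_compl_testBit k _ i hm]
    simp [h, Nat.testBit_mod_two_pow]

theorem pv_band_mask (a : Int) (k : Nat) :
    PySem.Int.band a ((2 : Int) ^ k - 1) = ((pvMask a k : Nat) : Int) := by
  have h2 : ((2 : Int) ^ k - 1) = ((2 ^ k - 1 : Nat) : Int) := by
    have : (1:Nat) ≤ 2 ^ k := Nat.one_le_two_pow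
    push_cast [this]; ring
  rw [h2]
  cases a with
  | ofNat m =>
    have h0 : (Int.ofNat m) = (m : Int) := rfl
    rw [h0, PySem.Int.band_natCast, Nat.and_two_pow_sub_one_eq_mod]
    rfl
  | negSucc m =>
    simp only [PySem.Int.band]
    have hneg : ¬ (0 ≤ Int.negSucc m) := by omega
    have hpos : (0:Int) ≤ ((2 ^ k - 1 : Nat) : Int) := by positivity
    rw [if_neg hneg, if_pos hpos]
    have h3 : (-(Int.negSucc m) - 1).toNat = m := by simp [Int.negSucc_eq]
    rw [h3, Int.toNat_natCast, Nat.and_comm, Nat.and_two_pow_sub_one_eq_mod]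
    simp only [pvMask]

theorem pv_loop_iff (bits : Int) (n : Int) :
    ∀ (d j : Nat) (prev : Int) (s : Bool), (j : Int) + d = n → 0 ≤ prev → prev < 2 ^ j →
      (0 < prev ↔ s = true) →
      (pvMonoLoop bits d (j : Int) prev = true ↔
        ((s = true → ∀ i : Nat, j ≤ i → (i : Int) < n → bits.testBit i = true) ∧
         (∀ i : Nat, j ≤ i → (i : Int) + 1 < n → bits.testBit i = true → bits.testBit (i + 1) = true))) := by
  intro d
  induction d with
  | zero =>
    intro j prev s hjd _ _ _
    simp only [pvMonoLoop]
    constructor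
    · intro _
      exact ⟨fun _ i hji hin => absurd hin (by push_cast; omega),
             fun i hji hin => absurd hin (by push_cast; omega)⟩
    · intro _; simp [pvMonoLoop]
  | succ d ih =>
    intro j prev s hjd hp0 hplt hps
    simp only [pvMonoLoop]
    have htn : ((j : Int)).toNat = j := by omega
    have hshl : (1 : Int) <<< j = 2 ^ j := by simp [Int.shiftLeft_eq]
    have hcast : ((j : Int) + 1) = ((j + 1 : Nat) : Int) := by push_cast; ring
    have hpow : (0:Int) < 2 ^ j := by positivity
    cases htb : bits.testBit j with
    | true =>
      have hb : PySem.Int.band bits ((1 : Int) <<< ((j : Int)).toNat) = (2:Int)^j := by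
        rw [htn, hshl, pv_band_pow, htb]; rfl
      rw [hb, if_neg (by omega)]
      rw [hcast, ih (j+1) ((2:Int)^j) true (by push_cast; omega) (by positivity)
            (by have h2 : (2:Int)^(j+1) = 2 * 2^j := by ring
                omega)
            ⟨fun _ => rfl, fun _ => hpow⟩]
      have hchain : ∀ i : Nat, j ≤ i → (i : Int) < n →
          (∀ i' : Nat, j ≤ i' → (i' : Int) + 1 < n → bits.testBit i' = true → bits.testBit (i' + 1) = true) →
          bits.testBit i = true := by
        intro i
        induction i with
        | zero =>
          intro hji _ _
          have hj0 : j = 0 := by omega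
          exact hj0 ▸ htb
        | succ i ihh =>
          intro hji hin h2
          rcases Nat.eq_or_lt_of_le hji with heq | hlt
          · exact heq ▸ htb
          · exact h2 i (by omega) (by push_cast at hin ⊢; omega)
              (ihh (by omega) (by push_cast at hin ⊢; omega) h2)
      constructor
      · rintro ⟨h1, h2i⟩
        refine ⟨fun _ i hji hin => ?_, fun i hji hin hbi => ?_⟩
        · rcases Nat.eq_or_lt_of_le hji with heq | hlt
          · exact heq ▸ htb
          · exact h1 rfl i (by omega) hin
        · rcases Nat.eq_or_lt_of_le hji with heq | hlt
          · exact h1 rfl (i+1) (by omega) (by push_cast at hin ⊢; omega)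
          · exact h2i i (by omega) hin hbi
      · rintro ⟨h1, h2⟩
        exact ⟨fun _ i hji hin => hchain i (by omega) hin h2,
               fun i hji hin hbi => h2 i (by omega) hin hbi⟩
    | false =>
      have hb : PySem.Int.band bits ((1 : Int) <<< ((j : Int)).toNat) = (0:Int) := by
        rw [htn, hshl, pv_band_pow, htb]; rfl
      rw [hb]
      by_cases hs : s = true
      · have hp : (0:Int) < prev := hps.mpr hs
        rw [if_pos hp]
        constructor
        · intro hfalse; exact Bool.noConfusion hfalse
        · rintro ⟨h1, h2⟩
          exfalso
          have := h1 hs j (le_refl j) (by omega)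
          rw [htb] at this; exact Bool.noConfusion this
      · have hp : ¬ ((0:Int) < prev) := fun hc => hs (hps.mp hc)
        rw [if_neg hp]
        rw [hcast, ih (j+1) 0 false (by push_cast; omega) (le_refl 0) (by positivity)
             (by simp)]
        constructor
        · rintro ⟨_, h2⟩
          refine ⟨fun hst => absurd hst hs, ?_⟩
          intro i hji hin hbi
          rcases Nat.eq_or_lt_of_le hji with rfl | hlt
          · rw [htb] at hbi; exact Bool.noConfusion hbi
          · exact h2 i (by omega) hin hbi
        · rintro ⟨h1, h2⟩
          exact ⟨fun hf => Bool.noConfusion hf,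
                 fun i hji hin hbi => h2 i (by omega) hin hbi⟩

theorem pv_pow2_iff (c : Nat) (hc : 0 < c) : (c &&& (c - 1) = 0) ↔ ∃ j, c = 2 ^ j := by
  constructor
  · intro h
    induction c using Nat.strong_induction_on with
    | _ c ih =>
      rcases Nat.even_or_odd c with he | ho
      · -- c even: c = 2*m
        obtain ⟨m, hm⟩ := he
        have hm2 : c = 2 * m := by omega
        have hmpos : 0 < m := by omega
        have hand : c &&& (c - 1) = 2 * (m &&& (m - 1)) := by
          apply Nat.eq_of_testBit_eq
          intro i
          cases i with
          | zero =>
            simp only [Nat.testBit_zero, Nat.testBit_and]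
            have e1 : c % 2 = 0 := by omega
            have e3 : (2 * (m &&& (m-1))) % 2 = 0 := by omega
            simp [e1, e3]
          | succ i =>
            rw [Nat.testBit_and]
            simp only [Nat.testBit_succ]
            have h1 : c / 2 = m := by omega
            have h2 : (c - 1) / 2 = m - 1 := by omega
            have h3 : (2 * (m &&& (m-1))) / 2 = m &&& (m - 1) := by omega
            rw [h1, h2, h3, Nat.testBit_and]
        rw [hand] at h
        have := ih m (by omega) hmpos (by omega)
        obtain ⟨j, hj⟩ := this
        exact ⟨j + 1, by rw [hm2, hj]; ring⟩
      · -- c odd: c = 2*m+1 ; and = 2*m, must be 0 so c = 1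
        obtain ⟨m, hm⟩ := ho
        have hand : c &&& (c - 1) = 2 * m := by
          apply Nat.eq_of_testBit_eq
          intro i
          cases i with
          | zero =>
            simp only [Nat.testBit_zero, Nat.testBit_and]
            have e1 : c % 2 = 1 := by omega
            have e2 : (c - 1) % 2 = 0 := by omega
            have e3 : (2 * m) % 2 = 0 := by omega
            simp [e1, e2, e3]
          | succ i =>
            rw [Nat.testBit_and]
            simp only [Nat.testBit_succ]
            have h1 : c / 2 = m := by omega
            have h2 : (c - 1) / 2 = m := by omega
            have h3 : (2 * m) / 2 = m := by omega
            rw [h1, h2, h3]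
            simp
        rw [hand] at h
        have : m = 0 := by omega
        exact ⟨0, by omega⟩
  · rintro ⟨j, rfl⟩
    rw [Nat.and_comm, Nat.and_two_pow]
    simp [Nat.testBit_two_pow_sub_one]

theorem pv_good_iff (k m : Nat) (hm : m < 2 ^ k) :
    (∀ i, i + 1 < k → m.testBit i = true → m.testBit (i + 1) = true) ↔
      ∃ j, j ≤ k ∧ m = 2 ^ k - 2 ^ j := by
  have hsub : ∀ j, j ≤ k → ∀ i, (2 ^ k - 2 ^ j : Nat).testBit i = (decide (j ≤ i) && decide (i < k)) := by
    intro j hj i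
    have hid : (2 ^ k - 2 ^ j : Nat) = (2 ^ k - 1) - (2 ^ j - 1) := by
      have := Nat.pow_le_pow_right (by omega : 1 ≤ 2) hj
      have := Nat.one_le_two_pow (n := j)
      omega
    rw [hid, pv_compl_testBit k _ i (by have := Nat.pow_le_pow_right (by omega : 1 ≤ 2) hj; have := Nat.one_le_two_pow (n := j); omega)]
    rw [Nat.testBit_two_pow_sub_one]
    by_cases h1 : i < k <;> by_cases h2 : j ≤ i <;> simp [h1, h2] <;> omega
  constructor
  · intro hgood
    by_cases hz : m = 0
    · exact ⟨k, le_refl k, by omega⟩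
    · have hex : ∃ i, m.testBit i = true := by
        by_contra hno
        push_neg at hno
        apply hz
        apply Nat.eq_of_testBit_eq
        intro i
        simp [Nat.zero_testBit, (Bool.not_eq_true _).mp (hno i)]
      classical
      let j := Nat.find hex
      have hj : m.testBit j = true := Nat.find_spec hex
      have hjmin : ∀ i, i < j → m.testBit i = false := by
        intro i hi
        have := Nat.find_min hex hi
        simpa using this
      have hjk : j < k := by
        by_contra hge
        push_neg at hge
        have : m.testBit j = false := Nat.testBit_lt_two_pow (lt_of_lt_of_le hm (Nat.pow_le_pow_right (by omega) hge))
        rw [this] at hj; exact Bool.noConfusion hj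
      have hall : ∀ i, j ≤ i → i < k → m.testBit i = true := by
        intro i hji hik
        induction i with
        | zero => have : j = 0 := by omega
                  rw [← this]; exact hj
        | succ i ih =>
          rcases Nat.lt_or_ge j (i+1) with hlt | hge
          · exact hgood i (by omega) (ih (by omega) (by omega))
          · have : j = i + 1 := by omega
            rw [← this]; exact hj
      refine ⟨j, by omega, ?_⟩
      apply Nat.eq_of_testBit_eq
      intro i
      rw [hsub j (by omega) i]
      by_cases h1 : j ≤ i <;> by_cases h2 : i < k <;> simp [h1, h2]
      · exact hall i h1 h2
      · exact Nat.testBit_lt_two_pow (lt_of_lt_of_le hm (Nat.pow_le_pow_right (by omega) (by omega)))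
      · exact hjmin i (by omega)
      · exact hjmin i (by omega)
  · rintro ⟨j, hj, rfl⟩
    intro i hi hbit
    rw [hsub j hj] at hbit ⊢
    simp at hbit ⊢
    omega

theorem pv_main (n bits : Int) : monotone_increasing n bits = monotone_increasing_alt n bits := by
  by_cases hn : n ≤ 0
  · have h0 : n.toNat = 0 := by omega
    rw [monotone_increasing, monotone_increasing_alt, if_pos hn, h0]
    simp [pvMonoLoop]
  · have hk : ((n.toNat : Int)) = n := by omega
    have hkpos : 0 < n.toNat := by omega
    set k := n.toNat with hkdef
    have hmlt := pvMask_lt bits k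
    set m := pvMask bits k with hmdef
    -- A characterized
    have hA : (monotone_increasing n bits = true) ↔
        (∀ i : Nat, i + 1 < k → m.testBit i = true → m.testBit (i + 1) = true) := by
      have hloop := pv_loop_iff bits n k 0 0 false (by omega) (le_refl 0) (by norm_num) (by simp)
      rw [show ((0:Nat):Int) = 0 from rfl] at hloop
      rw [monotone_increasing, hloop]
      constructor
      · rintro ⟨_, h2⟩ i hik hbi
        have hi1 : i + 1 < k := hik
        rw [pvMask_testBit bits k i (by omega)] at hbi
        rw [pvMask_testBit bits k (i+1) (by omega)]
        exact h2 i (Nat.zero_le i) (by push_cast; omega) hbi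
      · intro h
        refine ⟨fun hf => by simp at hf, ?_⟩
        intro i _ hin hbi
        have hik : i + 1 < k := by omega
        rw [← pvMask_testBit bits k i (by omega)] at hbi
        rw [← pvMask_testBit bits k (i+1) (by omega)]
        exact h i hik hbi
    -- B characterized
    have hB : (monotone_increasing_alt n bits = true) ↔ ((2 ^ k - m) &&& (2 ^ k - m - 1) = 0) := by
      rw [monotone_increasing_alt, if_neg hn]
      show (PySem.Int.band (((1 : Int) <<< k) - PySem.Int.band bits (((1 : Int) <<< k) - 1))
              ((((1 : Int) <<< k) - PySem.Int.band bits (((1 : Int) <<< k) - 1)) - 1) == 0) = true ↔ _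
      have hshl : (1 : Int) <<< k = 2 ^ k := by simp [Int.shiftLeft_eq]
      rw [hshl, pv_band_mask bits k]
      have hc1 : ((2:Int) ^ k - (m : Int)) = ((2 ^ k - m : Nat) : Int) := by
        push_cast [Nat.le_of_lt hmlt]; ring
      have hc2 : ((2 ^ k - m : Nat) : Int) - 1 = ((2 ^ k - m - 1 : Nat) : Int) := by
        push_cast [show 1 ≤ 2 ^ k - m by omega]; ring
      rw [hc1, hc2, PySem.Int.band_natCast]
      simp
    -- combine
    have hEx : (∀ i : Nat, i + 1 < k → m.testBit i = true → m.testBit (i + 1) = true) ↔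
        ((2 ^ k - m) &&& (2 ^ k - m - 1) = 0) := by
      rw [pv_good_iff k m hmlt, pv_pow2_iff (2 ^ k - m) (by omega)]
      constructor
      · rintro ⟨j, hj, hmeq⟩
        refine ⟨j, ?_⟩
        have := Nat.pow_le_pow_right (by omega : 1 ≤ 2) hj
        omega
      · rintro ⟨j, hj⟩
        have h2j : 2 ^ j ≤ 2 ^ k := by omega
        have hjk : j ≤ k := (Nat.pow_le_pow_iff_right (by omega)).mp h2j
        exact ⟨j, hjk, by omega⟩
    rw [Bool.eq_iff_iff, hA, hB]
    exact hEx

-- ===== VERDICT (by name: the statement is the Claim_ definition above) =====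
theorem monotone_increasing_spec : Claim_equal_monotone_increasing := by
  intro n bits _
  unfold Spec_monotone_increasing
  exact pv_main n bits
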